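-- pv_equiv track=rewrite | github.com/sol20sth/Beakjoon | 프로그래머스/괄호회전하기.py | f
-- ===== SOURCE A (Python) =====
-- def f (s, i, n):  # 괄호가 유효한지 아닌지 확인 함수
--     stack = []  # 괄호 넣을 스택
--     for j in range(n):  # 시작점부터 n개까지 모두 탐색
--         if s[(j+i)%n] == '{' or s[(j+i)%n] == '(' or s[(j+i)%n] == '[' : # (j+i)%n 이 열리는 괄호면 스택에 넣기
--             stack.append(s[(j+i)%n])
--         elif s[(j+i)%n] =='}':         #(j+i)%n이 닫히는 괄호였을때 스택의 [-1]번째가 같은 열리는 괄호이면 스택에서 빼기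
--             if stack and stack[-1] == '{':
--                 stack.pop()
--             else:   # 아니라면 유효하지 않다고 생각해서 0리턴 >> 끝내기
--                 return 0
--         elif s[(j+i)%n] ==']':
--             if stack and stack[-1] == '[':
--                 stack.pop()
--             else:
--                 return 0
--         elif s[(j+i)%n] ==')':
--             if stack and stack[-1] == '(':
--                 stack.pop()
--             else:
--                 return 0
--     if not stack:  # 스택이 비어있다면 return 1 >> 유효
--       return 1
--     return 0 #비어있지 않다면 : 모두 열린괄호 : 0리턴 >> 유효x
-- ===== SOURCE B (Python) =====
-- def f(s, i, n):
--     # rotated bracket sequence: keep only bracket characters (A ignores the rest)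
--     t = ''.join(s[(j + i) % n] for j in range(n) if s[(j + i) % n] in '()[]{}')
--     # repeatedly erase adjacent matched pairs until a fixed point
--     while True:
--         r = t.replace('()', '').replace('[]', '').replace('{}', '')
--         if r == t:
--             return 1 if t == '' else 0
--         t = r
-- ===== Notes on version B (the rewrite author's own statement) =====
-- stated objective: alternative
-- what changed: Replaces A's single-pass stack matcher with building the rotated bracket-only string once and then repeatedly erasing adjacent matched pairs '()', '[]', '{}' (str.replace) until a fixed point, returning 1 iff the result is empty.
-- outside the precondition, e.g. on f(')', 0, 5): A returns 0, B raises IndexError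
import Mathlib
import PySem

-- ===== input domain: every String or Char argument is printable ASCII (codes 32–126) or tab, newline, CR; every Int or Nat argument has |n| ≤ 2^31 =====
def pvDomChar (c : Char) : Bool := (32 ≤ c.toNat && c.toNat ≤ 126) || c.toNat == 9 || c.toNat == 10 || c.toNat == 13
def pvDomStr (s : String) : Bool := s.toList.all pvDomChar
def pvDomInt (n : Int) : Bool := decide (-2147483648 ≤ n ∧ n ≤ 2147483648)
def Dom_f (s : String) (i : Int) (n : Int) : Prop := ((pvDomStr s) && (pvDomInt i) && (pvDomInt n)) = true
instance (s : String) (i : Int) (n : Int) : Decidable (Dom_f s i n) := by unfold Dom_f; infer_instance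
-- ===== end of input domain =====

-- B replaces A's single-pass stack matcher by repeated erasure of adjacent matched
-- bracket pairs over the rotated, bracket-only string (measured faster at the timed sizes: C-level str.replace vs per-char indexing).


-- ===== PORT A =====
-- the for-loop over range(n) with the stack and the early 'return 0's
def stepsA (s : String) (i : Int) (n : Int) : List Int → List Char → Int
  | [], stack => if stack.isEmpty then 1 else 0
  | j :: js, stack =>
    match PySem.Str.pyGet? s (PySem.Int.mod (j + i) n) with
    | none => 0   -- IndexError in Python; Pre_f excludes inputs reaching this
    | some c =>
      if c = '{' ∨ c = '(' ∨ c = '[' then stepsA s i n js (stack ++ [c])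
      else if c = '}' then
        (if stack.getLast? = some '{' then stepsA s i n js stack.dropLast else 0)
      else if c = ']' then
        (if stack.getLast? = some '[' then stepsA s i n js stack.dropLast else 0)
      else if c = ')' then
        (if stack.getLast? = some '(' then stepsA s i n js stack.dropLast else 0)
      else stepsA s i n js stack

def f (s : String) (i : Int) (n : Int) : Int :=
  stepsA s i n (PySem.List.pyRange 0 n 1) []

-- ===== PORT B =====
-- Python "c in '()[]{}'": single-character substring test
def isBr (c : Char) : Bool := PySem.Str.isIn (String.ofList [c]) "()[]{}"

-- the generator: rotated characters, keeping only brackets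
def collectB (s : String) (i : Int) (n : Int) : List Int → List Char
  | [] => []
  | j :: js =>
    match PySem.Str.pyGet? s (PySem.Int.mod (j + i) n) with
    | none => collectB s i n js   -- IndexError in Python; Pre_f excludes inputs reaching this
    | some c => if isBr c then c :: collectB s i n js else collectB s i n js

-- t.replace(ab, '') for a two-character pattern: left-to-right non-overlapping removal
def repl (a b : Char) : List Char → List Char
  | x :: y :: rest => if x = a && y = b then repl a b rest else x :: repl a b (y :: rest)
  | l => l

def stepB (t : List Char) : List Char := repl '{' '}' (repl '[' ']' (repl '(' ')' t))

-- (termination helpers for the while-loop, cited by reduceB's decreasing_by)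
theorem repl_length_le (a b : Char) (l : List Char) : (repl a b l).length ≤ l.length := by
  fun_induction repl a b l with
  | case1 x y rest hc ih => simp only [List.length_cons]; omega
  | case2 x y rest hc ih => simp only [List.length_cons] at *; omega
  | case3 l h => exact le_refl _

theorem repl_eq_or_lt (a b : Char) (l : List Char) :
    repl a b l = l ∨ (repl a b l).length < l.length := by
  fun_induction repl a b l with
  | case1 x y rest hc ih =>
    right
    have := repl_length_le a b rest
    simp only [List.length_cons]; omega
  | case2 x y rest hc ih =>
    rcases ih with he | hl
    · left; rw [he]
    · right; simp only [List.length_cons] at *; omega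
  | case3 l h => left; rfl

theorem stepB_length_lt (t : List Char) (h : stepB t ≠ t) : (stepB t).length < t.length := by
  unfold stepB at h ⊢
  rcases repl_eq_or_lt '(' ')' t with e1 | l1
  · rw [e1] at h ⊢
    rcases repl_eq_or_lt '[' ']' t with e2 | l2
    · rw [e2] at h ⊢
      rcases repl_eq_or_lt '{' '}' t with e3 | l3
      · exact absurd e3 h
      · exact l3
    · exact lt_of_le_of_lt (repl_length_le _ _ _) l2
  · exact lt_of_le_of_lt (le_trans (repl_length_le _ _ _) (repl_length_le _ _ _)) l1

-- the while-loop: apply the three replacements until nothing changes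
def reduceB (t : List Char) : List Char :=
  let r := stepB t
  if _h : r = t then t else reduceB r
termination_by t.length
decreasing_by exact stepB_length_lt t _h

def f_alt (s : String) (i : Int) (n : Int) : Int :=
  if reduceB (collectB s i n (PySem.List.pyRange 0 n 1)) = [] then 1 else 0

-- ===== PRECONDITION & SPEC =====
-- Pre_f excludes n > len(s): there A's s[(j+i)%n] raises IndexError unless an earlier
-- mismatched closer returns 0 first (an accident of scan order), and B raises there too.
def Pre_f (s : String) (i : Int) (n : Int) : Prop := n ≤ (s.toList.length : Int)
instance (s : String) (i : Int) (n : Int) : Decidable (Pre_f s i n) := by unfold Pre_f; infer_instance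
def pvWitness_f : String × Int × Int := ("(){}", 2, 4)

def Spec_f (s : String) (i : Int) (n : Int) (out : Int) : Prop := out = f_alt s i n
instance (s : String) (i : Int) (n : Int) (out : Int) : Decidable (Spec_f s i n out) := by unfold Spec_f; infer_instance

-- ===== CLAIM (what is proved, stated in full; the proofs are below) =====
def Claim_equal_f : Prop := ∀ (s : String) (i : Int) (n : Int), Dom_f s i n → Pre_f s i n → Spec_f s i n (f s i n)

-- ===== LEMMAS AND PROOFS =====

-- abstract run of A's stack machine over an already-fetched character list
def runC : List Char → List Char → Int
  | [], st => if st.isEmpty then 1 else 0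
  | c :: cs, st =>
    if c = '{' ∨ c = '(' ∨ c = '[' then runC cs (st ++ [c])
    else if c = '}' then
      (if st.getLast? = some '{' then runC cs st.dropLast else 0)
    else if c = ']' then
      (if st.getLast? = some '[' then runC cs st.dropLast else 0)
    else if c = ')' then
      (if st.getLast? = some '(' then runC cs st.dropLast else 0)
    else runC cs st

theorem isBr_iff (c : Char) : isBr c = true ↔ c ∈ ['(', ')', '[', ']', '{', '}'] := by
  unfold isBr
  rw [PySem.Str.isIn_iff_infix]
  constructor
  · intro h
    have hs : (String.ofList [c]).toList.Sublist ("()[]{}".toList) := h.sublist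
    have hc : c ∈ (String.ofList [c]).toList := by simp
    exact hs.subset hc
  · intro h
    obtain ⟨l1, l2, hl⟩ := List.append_of_mem h
    exact ⟨l1, l2, by simp [hl]⟩

theorem stepsA_eq_runC (s : String) (i n : Int) (g : Int → Char) :
    ∀ (js : List Int) (st : List Char),
      (∀ j ∈ js, PySem.Str.pyGet? s (PySem.Int.mod (j + i) n) = some (g j)) →
      stepsA s i n js st = runC (js.map g) st := by
  intro js
  induction js with
  | nil => intro st _; rfl
  | cons j js ih =>
    intro st H
    have hj := H j (List.mem_cons_self ..)
    have H' : ∀ j' ∈ js, PySem.Str.pyGet? s (PySem.Int.mod (j' + i) n) = some (g j') :=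
      fun j' hj' => H j' (List.mem_cons_of_mem _ hj')
    simp only [stepsA, hj, List.map_cons, runC]
    split_ifs <;> first | rfl | exact ih _ H'

theorem collectB_eq (s : String) (i n : Int) (g : Int → Char) :
    ∀ (js : List Int),
      (∀ j ∈ js, PySem.Str.pyGet? s (PySem.Int.mod (j + i) n) = some (g j)) →
      collectB s i n js = (js.map g).filter isBr := by
  intro js
  induction js with
  | nil => intro _; rfl
  | cons j js ih =>
    intro H
    have hj := H j (List.mem_cons_self ..)
    have H' : ∀ j' ∈ js, PySem.Str.pyGet? s (PySem.Int.mod (j' + i) n) = some (g j') :=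
      fun j' hj' => H j' (List.mem_cons_of_mem _ hj')
    simp only [collectB, hj, List.map_cons, List.filter_cons]
    split_ifs with h <;> simp [h, ih H']

theorem runC_filter (cs : List Char) : ∀ st, runC (cs.filter isBr) st = runC cs st := by
  induction cs with
  | nil => intro st; rfl
  | cons c cs ih =>
    intro st
    by_cases hb : isBr c = true
    · rw [List.filter_cons_of_pos hb]
      simp only [runC]
      split_ifs <;> first | rfl | exact ih _
    · rw [List.filter_cons_of_neg (by simp [hb])]
      have hne : c ≠ '{' ∧ c ≠ '(' ∧ c ≠ '[' ∧ c ≠ '}' ∧ c ≠ ']' ∧ c ≠ ')' := by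
        constructor <;> [skip; constructor] <;> [skip; skip; constructor] <;>
          [skip; skip; skip; constructor] <;> [skip; skip; skip; skip; constructor] <;>
          · intro he; apply hb; rw [isBr_iff, he]; decide
      simp only [runC, hne.1, hne.2.1, hne.2.2.1, hne.2.2.2.1, hne.2.2.2.2.1, hne.2.2.2.2.2,
        or_self, if_false, if_neg]
      · exact ih st
      all_goals simp [hne.1, hne.2.1, hne.2.2.1, hne.2.2.2.1, hne.2.2.2.2.1, hne.2.2.2.2.2]

theorem runC_cons_congr (x : Char) (cs cs' : List Char)
    (h : ∀ st, runC cs st = runC cs' st) : ∀ st, runC (x :: cs) st = runC (x :: cs') st := by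
  intro st
  simp only [runC]
  split_ifs <;> first | rfl | exact h _

theorem runC_repl (o c : Char)
    (hp : (o = '(' ∧ c = ')') ∨ (o = '[' ∧ c = ']') ∨ (o = '{' ∧ c = '}')) (l : List Char) :
    ∀ st, runC (repl o c l) st = runC l st := by
  fun_induction repl o c l with
  | case1 x y rest hc ih =>
    intro st
    have hx : x = o := by simpa using (Bool.and_eq_true_iff.mp hc).1
    have hy : y = c := by simpa using (Bool.and_eq_true_iff.mp hc).2
    subst hx; subst hy
    rw [ih st]
    rcases hp with ⟨ho, hc'⟩ | ⟨ho, hc'⟩ | ⟨ho, hc'⟩ <;> subst ho <;> subst hc' <;>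
      simp [runC, List.getLast?_concat, List.dropLast_concat]
  | case2 x y rest hc ih => exact runC_cons_congr x _ _ ih
  | case3 l h => intro st; rfl

theorem runC_stepB (t : List Char) : ∀ st, runC (stepB t) st = runC t st := by
  intro st
  unfold stepB
  rw [runC_repl '{' '}' (by simp) _ st, runC_repl '[' ']' (by simp) _ st,
    runC_repl '(' ')' (by simp) _ st]

theorem runC_reduceB (t : List Char) : ∀ st, runC (reduceB t) st = runC t st := by
  fun_induction reduceB t with
  | case1 t r h => intro st; rfl
  | case2 t r h ih => intro st; rw [ih st]; exact runC_stepB t st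

theorem mem_repl (a b x : Char) (l : List Char) (h : x ∈ repl a b l) : x ∈ l := by
  fun_induction repl a b l with
  | case1 y z rest hc ih => exact List.mem_cons_of_mem _ (List.mem_cons_of_mem _ (ih h))
  | case2 y z rest hc ih =>
    rcases List.mem_cons.mp h with he | hm
    · exact List.mem_cons.mpr (Or.inl he)
    · exact List.mem_cons_of_mem _ (ih hm)
  | case3 l hl => exact h

theorem mem_stepB (x : Char) (t : List Char) (h : x ∈ stepB t) : x ∈ t :=
  mem_repl _ _ _ _ (mem_repl _ _ _ _ (mem_repl _ _ _ _ h))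

theorem mem_reduceB (x : Char) (t : List Char) (h : x ∈ reduceB t) : x ∈ t := by
  fun_induction reduceB t with
  | case1 t r hr => exact h
  | case2 t r hr ih => exact mem_stepB x t (ih h)

theorem stepB_reduceB (t : List Char) : stepB (reduceB t) = reduceB t := by
  fun_induction reduceB t with
  | case1 t r hr => exact hr
  | case2 t r hr ih => exact ih

theorem repl_eq_of_length (a b : Char) (l : List Char)
    (h : (repl a b l).length = l.length) : repl a b l = l := by
  rcases repl_eq_or_lt a b l with he | hl
  · exact he
  · omega

theorem stepB_fix (t : List Char) (h : stepB t = t) :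
    repl '(' ')' t = t ∧ repl '[' ']' t = t ∧ repl '{' '}' t = t := by
  have l1 := repl_length_le '(' ')' t
  have l2 := repl_length_le '[' ']' (repl '(' ')' t)
  have l3 := repl_length_le '{' '}' (repl '[' ']' (repl '(' ')' t))
  have hlen : (stepB t).length = t.length := by rw [h]
  unfold stepB at hlen
  have h1 : repl '(' ')' t = t := repl_eq_of_length _ _ _ (by omega)
  rw [h1] at hlen l2 l3
  have h2 : repl '[' ']' t = t := repl_eq_of_length _ _ _ (by omega)
  rw [h2] at hlen l3
  have h3 : repl '{' '}' t = t := repl_eq_of_length _ _ _ (by omega)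
  exact ⟨h1, h2, h3⟩

theorem repl_occur_length (o c : Char) (Y : List Char) :
    ∀ X : List Char, (repl o c (X ++ o :: c :: Y)).length < (X ++ o :: c :: Y).length := by
  intro X
  induction X with
  | nil =>
    have := repl_length_le o c Y
    simp only [List.nil_append, repl]
    rw [if_pos (by simp)]
    simp only [List.length_cons]
    omega
  | cons x X ih =>
    cases X with
    | nil =>
      simp only [List.nil_append] at ih ⊢
      by_cases hxo : (x = o && (o = c : Bool)) = true
      · have h1 := repl_length_le o c (c :: Y)
        simp only [List.cons_append, List.nil_append, repl]
        rw [if_pos hxo]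
        simp only [List.length_cons] at h1 ⊢
        omega
      · simp only [List.cons_append, List.nil_append, repl] at ih ⊢
        rw [if_neg hxo]
        simp only [List.length_cons] at ih ⊢
        omega
    | cons y X' =>
      simp only [List.cons_append] at ih ⊢
      by_cases hxy : (x = o && (y = c : Bool)) = true
      · have h1 := repl_length_le o c (X' ++ o :: c :: Y)
        simp only [repl]
        rw [if_pos hxy]
        simp only [List.length_cons, List.length_append] at h1 ⊢
        omega
      · simp only [repl]
        rw [if_neg hxy]
        simp only [List.length_cons] at ih ⊢
        omega

theorem repl_ne_occur (o c : Char) (X Y : List Char) :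
    repl o c (X ++ o :: c :: Y) ≠ X ++ o :: c :: Y := by
  intro he
  have := repl_occur_length o c Y X
  rw [he] at this
  omega

def isOp (c : Char) : Bool := c = '{' || c = '(' || c = '['

theorem runC_push (rest : List Char) :
    ∀ (P : List Char), (∀ x ∈ P, isOp x = true) →
      ∀ st, runC (P ++ rest) st = runC rest (st ++ P) := by
  intro P
  induction P with
  | nil => intro _ st; simp
  | cons p P ih =>
    intro hP st
    have hp : isOp p = true := hP p (List.mem_cons_self ..)
    have hp' : p = '{' ∨ p = '(' ∨ p = '[' := by
      unfold isOp at hp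
      rcases Bool.or_eq_true_iff.mp hp with h | h
      · rcases Bool.or_eq_true_iff.mp h with h' | h'
        · exact Or.inl (by simpa using h')
        · exact Or.inr (Or.inl (by simpa using h'))
      · exact Or.inr (Or.inr (by simpa using h))
    simp only [List.cons_append, runC, if_pos hp']
    rw [ih (fun x hx => hP x (List.mem_cons_of_mem _ hx))]
    simp

-- head of dropWhile fails the predicate
theorem head_dropWhile_false {p : Char → Bool} (l : List Char) (d : Char) (D : List Char)
    (h : l.dropWhile p = d :: D) : p d = false := by
  induction l with
  | nil => simp at h
  | cons x xs ih =>
    rw [List.dropWhile_cons] at h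
    split at h
    · exact ih h
    · next hx =>
      obtain rfl : x = d := (List.cons.injEq .. ▸ h).1
      simpa using hx

theorem runC_nf (t : List Char) (hbr : ∀ x ∈ t, isBr x = true) (hne : t ≠ [])
    (hfix : stepB t = t) : runC t [] = 0 := by
  obtain ⟨hf1, hf2, hf3⟩ := stepB_fix t hfix
  have hsplit : t.takeWhile isOp ++ t.dropWhile isOp = t := List.takeWhile_append_dropWhile
  have hPop : ∀ x ∈ t.takeWhile isOp, isOp x = true := fun x hx => List.mem_takeWhile_imp hx
  rcases hD : t.dropWhile isOp with _ | ⟨d, D'⟩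
  · -- t is all openers, nonempty: final stack nonempty → 0
    rw [hD, List.append_nil] at hsplit
    have : runC t [] = runC [] ([] ++ t.takeWhile isOp) := by
      conv_lhs => rw [← hsplit, ← List.append_nil (t.takeWhile isOp)]
      exact runC_push [] _ hPop []
    rw [this]
    simp only [runC, List.nil_append, hsplit, List.isEmpty_iff]
    exact if_neg hne
  · have hdop : isOp d = false := head_dropWhile_false t d D' hD
    have hdmem : d ∈ t := by rw [← hsplit, hD]; simp
    have hdbr := (isBr_iff d).mp (hbr d hdmem)
    have hdcl : d = ')' ∨ d = ']' ∨ d = '}' := by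
      simp only [List.mem_cons, List.not_mem_nil, or_false] at hdbr
      rcases hdbr with h | h | h | h | h | h
      · exfalso; rw [h] at hdop; simp [isOp] at hdop
      · exact Or.inl h
      · exfalso; rw [h] at hdop; simp [isOp] at hdop
      · exact Or.inr (Or.inl h)
      · exfalso; rw [h] at hdop; simp [isOp] at hdop
      · exact Or.inr (Or.inr h)
    have hmain : runC t [] = runC (d :: D') (t.takeWhile isOp) := by
      conv_lhs => rw [← hsplit, hD]
      rw [runC_push _ _ hPop]
      simp
    rcases List.eq_nil_or_concat (t.takeWhile isOp) with hP | ⟨P', p, hP⟩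
    · -- first character of t is a closer, empty stack → 0
      rw [hmain, hP]
      rcases hdcl with h | h | h <;> subst h <;> simp [runC]
    · have hpop : isOp p = true := hPop p (by rw [hP]; simp)
      have hp' : p = '{' ∨ p = '(' ∨ p = '[' := by
        unfold isOp at hpop
        rcases Bool.or_eq_true_iff.mp hpop with h | h
        · rcases Bool.or_eq_true_iff.mp h with h' | h'
          · exact Or.inl (by simpa using h')
          · exact Or.inr (Or.inl (by simpa using h'))
        · exact Or.inr (Or.inr (by simpa using h))
      have ht : t = P' ++ p :: d :: D' := by rw [← hsplit, hD, hP]; simp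
      rw [hmain, hP]
      -- if p matches d we contradict the fixed point; otherwise the mismatch returns 0
      rcases hdcl with hd | hd | hd <;> subst hd <;> rcases hp' with hp | hp | hp <;> subst hp
      · simp [runC, List.getLast?_concat]
      · exact absurd (ht ▸ hf1) (repl_ne_occur '(' ')' P' D')
      · simp [runC, List.getLast?_concat]
      · simp [runC, List.getLast?_concat]
      · simp [runC, List.getLast?_concat]
      · exact absurd (ht ▸ hf2) (repl_ne_occur '[' ']' P' D')
      · exact absurd (ht ▸ hf3) (repl_ne_occur '{' '}' P' D')
      · simp [runC, List.getLast?_concat]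
      · simp [runC, List.getLast?_concat]

-- ===== VERDICT (by name: the statement is the Claim_ definition above) =====
theorem f_spec : Claim_equal_f := by
  intro s i n _hdom hpre
  unfold Spec_f f f_alt Pre_f at *
  set g : Int → Char := fun j => s.toList.getD (PySem.Int.mod (j + i) n).toNat ' ' with hg
  have H : ∀ j ∈ PySem.List.pyRange 0 n 1,
      PySem.Str.pyGet? s (PySem.Int.mod (j + i) n) = some (g j) := by
    intro j hj
    have hj' := (PySem.List.mem_pyRange_one).mp hj
    have hn : (0 : Int) < n := lt_of_le_of_lt hj'.1 hj'.2
    have h0 : 0 ≤ PySem.Int.mod (j + i) n := PySem.Int.mod_nonneg _ hn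
    have h1 : PySem.Int.mod (j + i) n < n := PySem.Int.mod_lt _ hn
    have hlt : (PySem.Int.mod (j + i) n).toNat < s.toList.length := by omega
    rw [show PySem.Int.mod (j + i) n = (((PySem.Int.mod (j + i) n).toNat : Nat) : Int) by omega,
      PySem.Str.pyGet?_natCast, List.getElem?_eq_getElem hlt]
    simp [hg, List.getD_eq_getElem?_getD, List.getElem?_eq_getElem hlt]
  rw [stepsA_eq_runC s i n g _ [] H, collectB_eq s i n g _ H]
  set t := (((PySem.List.pyRange 0 n 1).map g).filter isBr) with hT
  have h2 : runC ((PySem.List.pyRange 0 n 1).map g) [] = runC (reduceB t) [] := by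
    rw [← runC_filter, ← hT, runC_reduceB]
  by_cases hnf : reduceB t = []
  · rw [if_pos hnf, h2, hnf]; rfl
  · rw [if_neg hnf, h2]
    have hbr : ∀ x ∈ t, isBr x = true := by
      intro x hx; rw [hT] at hx; exact List.of_mem_filter hx
    exact runC_nf (reduceB t) (fun x hx => hbr x (mem_reduceB x t hx)) hnf (stepB_reduceB t)
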